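-- pv_equiv track=rewrite | github.com/sodawaki630-ops/eror-code | Streamlit_app.py | util_fn_182
-- ===== SOURCE A (Python) =====
-- from typing import List, Dict, Any, Optional, Tuple
--
-- def util_fn_182(lst: List[int]) -> List[int]:
--     """Return zigzag reorder: first, last, second, second-last, ..."""
--     out = []
--     i, j = 0, len(lst) - 1
--     while i <= j:
--         out.append(lst[i])
--         if i != j:
--             out.append(lst[j])
--         i += 1
--         j -= 1
--     return out
-- ===== SOURCE B (Python) =====
-- def util_fn_182(lst):
--     """Return zigzag reorder: first, last, second, second-last, ..."""
--     return [x for pair in zip(lst, reversed(lst)) for x in pair][:len(lst)]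
-- ===== Notes on version B (the rewrite author's own statement) =====
-- stated objective: simpler
-- what changed: Replaces the two-pointer while loop with its i==j parity branch by interleaving the list with its reverse (zip, flatten) and truncating to the original length.
import Mathlib
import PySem

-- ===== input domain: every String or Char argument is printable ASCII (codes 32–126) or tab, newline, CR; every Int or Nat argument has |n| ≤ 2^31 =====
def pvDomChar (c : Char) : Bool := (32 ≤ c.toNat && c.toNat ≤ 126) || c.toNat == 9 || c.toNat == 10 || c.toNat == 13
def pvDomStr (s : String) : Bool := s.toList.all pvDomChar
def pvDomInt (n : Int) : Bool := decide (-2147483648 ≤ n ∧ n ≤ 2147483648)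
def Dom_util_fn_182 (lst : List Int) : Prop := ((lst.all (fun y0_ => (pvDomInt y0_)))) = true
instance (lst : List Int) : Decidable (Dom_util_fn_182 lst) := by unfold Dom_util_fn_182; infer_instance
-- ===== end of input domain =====

-- B replaces A's two-pointer loop (with its i==j parity branch) by interleaving the
-- list with its reverse and truncating to the original length; objective: simpler.


-- ===== PORT A =====
-- the while loop with pointers i, j; indices are always in range when reached,
-- so `.getD 0` is never the value Python would not compute
def pvLoopA (lst : List Int) (i j : Int) (out : List Int) : List Int :=
  if i ≤ j then
    pvLoopA lst (i + 1) (j - 1)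
      (if i ≠ j then
        (out ++ [(PySem.List.pyGet? lst i).getD 0]) ++ [(PySem.List.pyGet? lst j).getD 0]
       else out ++ [(PySem.List.pyGet? lst i).getD 0])
  else out
termination_by (j + 1 - i).toNat
decreasing_by omega

def util_fn_182 (lst : List Int) : List Int :=
  pvLoopA lst 0 ((lst.length : Int) - 1) []

-- ===== PORT B =====
def util_fn_182_alt (lst : List Int) : List Int :=
  PySem.List.slice ((lst.zip lst.reverse).flatMap (fun p => [p.1, p.2]))
    none (some (lst.length : Int))

-- ===== PRECONDITION & SPEC =====
def Spec_util_fn_182 (lst : List Int) (out : List Int) : Prop := out = util_fn_182_alt lst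
instance (lst : List Int) (out : List Int) : Decidable (Spec_util_fn_182 lst out) := by unfold Spec_util_fn_182; infer_instance

-- ===== CLAIM (what is proved, stated in full; the proofs are below) =====
def Claim_equal_util_fn_182 : Prop := ∀ (lst : List Int), Dom_util_fn_182 lst → Spec_util_fn_182 lst (util_fn_182 lst)

-- ===== LEMMAS AND PROOFS =====

-- reference zigzag, peeling one element from each end
def pvZig (xs : List Int) : List Int :=
  List.bidirectionalRec (motive := fun _ => List Int)
    [] (fun a => [a]) (fun a _ b ih => a :: b :: ih) xs

theorem pvZig_nil : pvZig [] = [] := List.bidirectionalRec_nil ..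

theorem pvZig_singleton (a : Int) : pvZig [a] = [a] := List.bidirectionalRec_singleton ..

theorem pvZig_cons_append (a b : Int) (ys : List Int) :
    pvZig (a :: (ys ++ [b])) = a :: b :: pvZig ys := List.bidirectionalRec_cons_append ..

theorem pvLoopA_eq (xs : List Int) : ∀ (pre suf out : List Int),
    pvLoopA (pre ++ xs ++ suf) (pre.length : Int)
      ((pre.length : Int) + (xs.length : Int) - 1) out = out ++ pvZig xs := by
  induction xs using List.bidirectionalRec with
  | nil =>
    intro pre suf out
    rw [pvLoopA, if_neg (by simp)]
    simp [pvZig_nil]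
  | singleton a =>
    intro pre suf out
    rw [pvLoopA, if_pos (by simp), pvLoopA,
      if_neg (by simp only [List.length_cons, List.length_nil]; push_cast; omega)]
    rw [if_neg (by simp only [List.length_cons, List.length_nil]; push_cast; omega)]
    have h : pre ++ [a] ++ suf = pre ++ a :: suf := by simp
    rw [h, PySem.List.pyGet?_append_length, pvZig_singleton]
    simp
  | cons_append a ys b ih =>
    intro pre suf out
    have hlen : (((a :: (ys ++ [b])).length : Int)) = (ys.length : Int) + 2 := by
      simp; omega
    rw [hlen, pvLoopA, if_pos (by omega), if_pos (by omega)]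
    have hget_i : PySem.List.pyGet? (pre ++ (a :: (ys ++ [b])) ++ suf) (pre.length : Int)
        = some a := by
      have h1 : pre ++ (a :: (ys ++ [b])) ++ suf = pre ++ a :: (ys ++ b :: suf) := by simp
      rw [h1]; exact PySem.List.pyGet?_append_length pre (ys ++ b :: suf) a
    have hget_j : PySem.List.pyGet? (pre ++ (a :: (ys ++ [b])) ++ suf)
        ((pre.length : Int) + ((ys.length : Int) + 2) - 1) = some b := by
      have h2 : pre ++ (a :: (ys ++ [b])) ++ suf = (pre ++ a :: ys) ++ b :: suf := by simp
      have hj : ((pre.length : Int) + ((ys.length : Int) + 2) - 1)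
          = (((pre ++ a :: ys).length : Int)) := by simp; omega
      rw [hj, h2]; exact PySem.List.pyGet?_append_length (pre ++ a :: ys) suf b
    rw [hget_i, hget_j]
    have h3 : pre ++ (a :: (ys ++ [b])) ++ suf = (pre ++ [a]) ++ ys ++ (b :: suf) := by simp
    have hi' : ((pre.length : Int) + 1) = (((pre ++ [a]).length : Int)) := by simp
    have hj' : ((pre.length : Int) + ((ys.length : Int) + 2) - 1 - 1)
        = (((pre ++ [a]).length : Int) + (ys.length : Int) - 1) := by simp; omega
    rw [h3, hi', hj', ih (pre ++ [a]) (b :: suf)]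
    rw [pvZig_cons_append]
    simp

theorem pvFlat_len (l : List (Int × Int)) :
    (l.flatMap (fun p => [p.1, p.2])).length = 2 * l.length := by
  induction l with
  | nil => simp
  | cons x xs ih => simp [ih]; omega

theorem pvAlt_eq_zig (xs : List Int) :
    ((xs.zip xs.reverse).flatMap (fun p => [p.1, p.2])).take xs.length = pvZig xs := by
  induction xs using List.bidirectionalRec with
  | nil => simp [pvZig_nil]
  | singleton a => simp [pvZig_singleton]
  | cons_append a ys b ih =>
    have hrev : (a :: (ys ++ [b])).reverse = b :: (ys.reverse ++ [a]) := by simp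
    rw [hrev]
    have hzip : (a :: (ys ++ [b])).zip (b :: (ys.reverse ++ [a]))
        = (a, b) :: (ys.zip ys.reverse ++ [(b, a)]) := by
      rw [List.zip_cons_cons, List.zip_append (by simp)]; rfl
    rw [hzip]
    have hlen : (a :: (ys ++ [b])).length = ys.length + 2 := by simp
    rw [hlen, List.flatMap_cons, List.flatMap_append]
    have hflat1 : (([(b, a)] : List (Int × Int)).flatMap (fun p => [p.1, p.2])) = [b, a] := rfl
    rw [hflat1]
    have htake : (((ys.zip ys.reverse).flatMap (fun p => [p.1, p.2])) ++ [b, a]).take ys.length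
        = ((ys.zip ys.reverse).flatMap (fun p => [p.1, p.2])).take ys.length := by
      apply List.take_append_of_le_length
      rw [pvFlat_len, List.length_zip, List.length_reverse]
      omega
    simp only [List.cons_append, List.nil_append, List.take_succ_cons]
    rw [htake, ih, pvZig_cons_append]

-- ===== VERDICT (by name: the statement is the Claim_ definition above) =====
theorem util_fn_182_spec : Claim_equal_util_fn_182 := by
  intro lst _
  unfold Spec_util_fn_182 util_fn_182 util_fn_182_alt
  rw [PySem.List.slice_to _ (by positivity), Int.toNat_natCast, pvAlt_eq_zig]
  have := pvLoopA_eq lst [] [] []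
  simpa using this
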